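-- pv_equiv track=rewrite | github.com/TayPark/coding-test-fry | programmers/42626.py | solution
-- ===== SOURCE A (Python) =====
-- import heapq
--
-- def solution(scoville, K):
--     heap = []
--
--     # 매번 정렬하는 비용을 줄이기 위해 Heap 사용
--     for value in scoville:
--         heapq.heappush(heap, value)
--
--     count = 0
--
--     # 가장 작은 값이 K보다 크면 반복 끝
--     while heap[0] < K:
--         try:
--             heapq.heappush(heap, heapq.heappop(heap) + heapq.heappop(heap) * 2)
--         except IndexError:  # 만약 인덱스 에러가 생길 경우(제한 사항을 만족시키지 못할 경우)
--             return -1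
--         count += 1
--
--     return count
-- ===== SOURCE B (Python) =====
-- # Sorted-list strategy: sort once, pop the two smallest from the front,
-- # splice the mixed value back in at its ordered position.
--
-- def _insert_sorted(sl, v):
--     for i, x in enumerate(sl):
--         if v < x:
--             return sl[:i] + [v] + sl[i:]
--     return sl + [v]
--
-- def solution(scoville, K):
--     sl = sorted(scoville)
--     count = 0
--     while sl[0] < K:
--         if len(sl) < 2:
--             return -1
--         sl = _insert_sorted(sl[2:], sl[0] + sl[1] * 2)
--         count += 1
--     return count
-- ===== Notes on version B (the rewrite author's own statement) =====
-- stated objective: alternative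
-- what changed: Replaces the binary heap (heapq heappush/heappop with sift operations) by a sorted list: sort once, take the two smallest from the front in O(1), and splice the mixed value back in at its ordered position.
import Mathlib
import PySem

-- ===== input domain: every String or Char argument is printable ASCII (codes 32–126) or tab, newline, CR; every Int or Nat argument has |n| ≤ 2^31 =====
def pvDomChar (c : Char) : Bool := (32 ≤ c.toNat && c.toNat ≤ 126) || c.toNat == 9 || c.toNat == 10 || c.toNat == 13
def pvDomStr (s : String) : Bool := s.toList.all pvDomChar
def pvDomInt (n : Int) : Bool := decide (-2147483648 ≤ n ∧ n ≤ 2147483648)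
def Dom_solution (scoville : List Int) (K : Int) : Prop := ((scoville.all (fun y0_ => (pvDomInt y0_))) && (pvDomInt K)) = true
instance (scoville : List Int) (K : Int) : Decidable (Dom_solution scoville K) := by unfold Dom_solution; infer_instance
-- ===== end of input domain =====

-- B replaces A's binary heap by a sorted list (sort once, take the two smallest from the
-- front, splice the mix back in at its ordered position): an alternative data structure,
-- not claimed faster. Neither version mutates its arguments.

-- ===== PORT A =====
-- A uses Python's heapq; heapq's heappush/heappop (CPython's _siftdown/_siftup) are
-- transliterated below on List Int ((pos-1)>>1 is (pos-1)/2 on Nat; element reads use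
-- getD 0 — every index heapq reads is in range, so the default is never the result).

def pvSiftdown (heap : List Int) (startpos pos : Nat) (newitem : Int) : List Int :=
  if _h : startpos < pos then
    -- parentpos := (pos - 1) >> 1; parent := heap[parentpos]
    if newitem < heap.getD ((pos - 1) / 2) 0 then
      pvSiftdown (heap.set pos (heap.getD ((pos - 1) / 2) 0)) startpos ((pos - 1) / 2) newitem
    else
      heap.set pos newitem
  else
    heap.set pos newitem
termination_by pos
decreasing_by have := Nat.div_le_self (pos - 1) 2; omega

def pvChild (heap : List Int) (endpos pos : Nat) : Nat :=
  if 2 * pos + 2 < endpos ∧ ¬ heap.getD (2 * pos + 1) 0 < heap.getD (2 * pos + 2) 0 then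
    2 * pos + 2
  else 2 * pos + 1

def pvSiftup (heap : List Int) (endpos startpos pos : Nat) (newitem : Int) : List Int :=
  if _h : 2 * pos + 1 < endpos then
    -- childpos := index of the smaller child (right preferred on ties), as in CPython
    pvSiftup (heap.set pos (heap.getD (pvChild heap endpos pos) 0)) endpos startpos
      (pvChild heap endpos pos) newitem
  else
    pvSiftdown (heap.set pos newitem) startpos pos newitem
termination_by endpos - pos
decreasing_by have : pvChild heap endpos pos ≤ 2 * pos + 2 := by unfold pvChild; split <;> omega
              have h2 : 2 * pos + 1 ≤ pvChild heap endpos pos := by unfold pvChild; split <;> omega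
              have h3 : pvChild heap endpos pos < endpos := by unfold pvChild; split <;> omega
              omega

def pvHeappush (heap : List Int) (item : Int) : List Int :=
  pvSiftdown (heap ++ [item]) 0 heap.length item

def pvHeappop (heap : List Int) : Option (Int × List Int) :=
  match heap.getLast? with
  | none => none                       -- IndexError
  | some lastelt =>
    let rest := heap.dropLast
    if rest.isEmpty then some (lastelt, [])
    else some (rest.headD 0, pvSiftup (rest.set 0 lastelt) rest.length 0 0 lastelt)

def pvLoop (K : Int) (heap : List Int) (count : Int) (fuel : Nat) : Int :=
  -- fuel only makes the while-loop total: every iteration shrinks the heap by one,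
  -- so fuel = initial length + 1 is never exhausted
  match fuel with
  | 0 => 0
  | fuel + 1 =>
    match heap with
    | [] => 0                          -- heap[0] raises: outside Pre_solution
    | h0 :: _ =>
      if h0 < K then
        match pvHeappop heap with
        | none => -1                    -- IndexError caught: return -1
        | some (a, heap1) =>
          match pvHeappop heap1 with
          | none => -1                  -- IndexError caught: return -1
          | some (b, heap2) =>
            pvLoop K (pvHeappush heap2 (a + b * 2)) (count + 1) fuel
      else count

def solution (scoville : List Int) (K : Int) : Int :=
  pvLoop K (scoville.foldl pvHeappush []) 0 ((scoville.foldl pvHeappush []).length + 1)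

-- ===== PORT B =====
-- _insert_sorted(sl, v): insert v in front of the first strictly larger element.
def pvInsertSorted (sl : List Int) (v : Int) : List Int :=
  match sl with
  | [] => [v]
  | x :: xs => if v < x then v :: x :: xs else x :: pvInsertSorted xs v

theorem length_pvInsertSorted (sl : List Int) (v : Int) :
    (pvInsertSorted sl v).length = sl.length + 1 := by
  induction sl with
  | nil => rfl
  | cons x xs ih => simp only [pvInsertSorted]; split <;> simp [ih]

def pvGo (K : Int) (sl : List Int) (count : Int) : Int :=
  match sl with
  | [] => 0                            -- sl[0] raises: outside Pre_solution
  | a :: rest =>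
    if a < K then
      match rest with
      | [] => -1                       -- len(sl) < 2
      | b :: rest2 => pvGo K (pvInsertSorted rest2 (a + b * 2)) (count + 1)
    else count
termination_by sl.length
decreasing_by simp [length_pvInsertSorted]

def solution_alt (scoville : List Int) (K : Int) : Int :=
  pvGo K (PySem.List.sorted scoville (fun x => x) false) 0

-- ===== PRECONDITION & SPEC =====
-- Pre_ excludes only the empty list, on which A (heap[0]) and B (sl[0]) both raise IndexError.
def Pre_solution (scoville : List Int) (K : Int) : Prop := scoville ≠ []
instance (scoville : List Int) (K : Int) : Decidable (Pre_solution scoville K) := by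
  unfold Pre_solution; infer_instance

def pvWitness_solution : List Int × Int := ([1, 2, 3, 9, 10, 12], 7)

def Spec_solution (scoville : List Int) (K : Int) (out : Int) : Prop := out = solution_alt scoville K
instance (scoville : List Int) (K : Int) (out : Int) : Decidable (Spec_solution scoville K out) := by
  unfold Spec_solution; infer_instance

-- ===== CLAIM (what is proved, stated in full; the proofs are below) =====
def Claim_equal_solution : Prop := ∀ (scoville : List Int) (K : Int), Dom_solution scoville K → Pre_solution scoville K → Spec_solution scoville K (solution scoville K)

-- ===== LEMMAS AND PROOFS =====

theorem length_pvSiftdown (startpos pos : Nat) (heap : List Int) (v : Int) :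
    (pvSiftdown heap startpos pos v).length = heap.length := by
  fun_induction pvSiftdown heap startpos pos v <;> simp_all

theorem length_pvHeappush (heap : List Int) (v : Int) :
    (pvHeappush heap v).length = heap.length + 1 := by
  simp [pvHeappush, length_pvSiftdown]

-- parent index in the implicit heap tree
def pvPar (i : Nat) : Nat := (i - 1) / 2

def IsHeap (h : List Int) : Prop :=
  ∀ i, 0 < i → i < h.length → h.getD (pvPar i) 0 ≤ h.getD i 0

-- invariant of _siftdown (bubble-up), about g = heap with newitem already at the hole
def SdInv (g : List Int) (pos : Nat) : Prop :=
  (∀ i, 0 < i → i < g.length → i ≠ pos → g.getD (pvPar i) 0 ≤ g.getD i 0) ∧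
  (0 < pos → ∀ j, j < g.length → pvPar j = pos → g.getD (pvPar pos) 0 ≤ g.getD j 0)

-- invariant of _siftup (hole moving down); the hole's own content is garbage
def SuInv (h : List Int) (pos : Nat) : Prop :=
  (∀ i, 0 < i → i < h.length → i ≠ pos → pvPar i ≠ pos → h.getD (pvPar i) 0 ≤ h.getD i 0) ∧
  (0 < pos → ∀ j, j < h.length → pvPar j = pos → h.getD (pvPar pos) 0 ≤ h.getD j 0)

theorem getD_set_self (l : List Int) (i : Nat) (v : Int) (h : i < l.length) :
    (l.set i v).getD i 0 = v := by
  simp [List.getD_eq_getElem?_getD, h]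

theorem getD_set_ne (l : List Int) (i j : Nat) (v : Int) (h : i ≠ j) :
    (l.set i v).getD j 0 = l.getD j 0 := by
  simp [List.getD_eq_getElem?_getD, List.getElem?_set_ne, h]

theorem count_set (l : List Int) (i : Nat) (v x : Int) (h : i < l.length) :
    (l.set i v).count x + (if l.getD i 0 = x then 1 else 0)
      = l.count x + (if v = x then 1 else 0) := by
  have p1 := (List.set_perm_cons_eraseIdx h v).count x
  have p2 := (List.getElem_cons_eraseIdx_perm h).count x
  rw [List.getD_eq_getElem l 0 h]
  simp only [List.count_cons, beq_iff_eq] at p1 p2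
  split_ifs at * <;> omega

theorem perm_swap (l : List Int) (i j : Nat) (hij : i ≠ j) (hi : i < l.length)
    (hj : j < l.length) :
    ((l.set i (l.getD j 0)).set j (l.getD i 0)).Perm l := by
  apply List.perm_iff_count.mpr
  intro x
  have c1 := count_set l i (l.getD j 0) x hi
  have c2 := count_set (l.set i (l.getD j 0)) j (l.getD i 0) x (by simpa using hj)
  rw [getD_set_ne _ _ _ _ hij] at c2
  split_ifs at * <;> omega

theorem pvPar_lt (i : Nat) (h : 0 < i) : pvPar i < i := by
  unfold pvPar; omega

theorem sd_spec : ∀ (pos : Nat) (h : List Int) (v : Int), pos < h.length →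
    SdInv (h.set pos v) pos →
    IsHeap (pvSiftdown h 0 pos v) ∧ (pvSiftdown h 0 pos v).Perm (h.set pos v) := by
  intro pos
  induction pos using Nat.strong_induction_on with
  | _ pos ih =>
    intro h v hlt hinv
    rw [pvSiftdown]
    by_cases hp : 0 < pos
    · rw [dif_pos hp]
      set g := h.set pos v with hg
      set p := (pos - 1) / 2 with hpdef
      have hppos : p < pos := by omega
      have hplen : p < h.length := lt_trans hppos hlt
      have hpar : h.getD p 0 = g.getD p 0 := (getD_set_ne h pos p v (by omega)).symm
      have hparpos : pvPar pos = p := rfl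
      have hgp : g.getD pos 0 = v := getD_set_self h pos v hlt
      obtain ⟨ha, hb⟩ := hinv
      by_cases hvp : v < h.getD p 0
      · rw [if_pos hvp]
        have hset1 : h.set pos (h.getD p 0) = g.set pos (h.getD p 0) := by
          rw [hg, List.set_set]
        have hglen : g.length = h.length := by simp [hg]
        have hswap : ((h.set pos (h.getD p 0)).set p v).Perm g := by
          rw [hset1, hpar, ← hgp]
          exact perm_swap g pos p (by omega) (by omega) (by omega)
        have hother : ∀ k, k ≠ p → k ≠ pos →
            ((h.set pos (h.getD p 0)).set p v).getD k 0 = g.getD k 0 := by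
          intro k hk1 hk2
          rw [getD_set_ne _ _ _ _ (Ne.symm hk1), getD_set_ne _ _ _ _ (Ne.symm hk2), hg,
            getD_set_ne _ _ _ _ (Ne.symm hk2)]
        have hatp : ((h.set pos (h.getD p 0)).set p v).getD p 0 = v :=
          getD_set_self _ _ _ (by simpa using hplen)
        have hatpos : ((h.set pos (h.getD p 0)).set p v).getD pos 0 = h.getD p 0 := by
          rw [getD_set_ne _ _ _ _ (by omega : p ≠ pos)]
          exact getD_set_self _ _ _ hlt
        have hlen' : ∀ k : Nat, k < ((h.set pos (h.getD p 0)).set p v).length ↔ k < h.length := by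
          simp
        have hinv' : SdInv ((h.set pos (h.getD p 0)).set p v) p := by
          constructor
          · intro i h0 hiN hip
            rw [hlen'] at hiN
            by_cases hipos : i = pos
            · subst hipos
              rw [hparpos, hatp, hatpos]
              exact le_of_lt hvp
            · have hii : ((h.set pos (h.getD p 0)).set p v).getD i 0 = g.getD i 0 :=
                hother i hip hipos
              by_cases hpi : pvPar i = p
              · rw [hpi, hatp, hii]
                have hx := ha i h0 (by omega) hipos
                rw [hpi] at hx
                calc v ≤ h.getD p 0 := le_of_lt hvp
                  _ = g.getD p 0 := hpar
                  _ ≤ g.getD i 0 := hx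
              · by_cases hpi2 : pvPar i = pos
                · rw [hpi2, hatpos, hii, hpar]
                  have hx := hb hp i (by omega) hpi2
                  rw [hparpos] at hx
                  exact hx
                · rw [hother _ hpi hpi2, hii]
                  exact ha i h0 (by omega) hipos
          · intro hppos' j hj hpj
            rw [hlen'] at hj
            have hpp : pvPar p < p := pvPar_lt p hppos'
            have h1 : ((h.set pos (h.getD p 0)).set p v).getD (pvPar p) 0 = g.getD (pvPar p) 0 :=
              hother _ (by omega) (by omega)
            have hstep : g.getD (pvPar p) 0 ≤ g.getD p 0 :=
              ha p hppos' (by omega) (by omega)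
            by_cases hjpos : j = pos
            · subst hjpos
              rw [h1, hatpos, hpar]
              exact hstep
            · have hjp : p < j := by unfold pvPar at hpj; omega
              rw [h1, hother j (by omega) hjpos]
              refine le_trans hstep ?_
              have hx := ha j (by omega) (by omega) hjpos
              rw [hpj] at hx
              exact hx
        obtain ⟨hih1, hih2⟩ := ih p hppos (h.set pos (h.getD p 0)) v (by simpa using hplen) hinv'
        exact ⟨hih1, hih2.trans hswap⟩
      · rw [if_neg hvp]
        refine ⟨?_, List.Perm.refl _⟩
        intro i h0 hiN
        by_cases hipos : i = pos
        · subst hipos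
          rw [hparpos, hgp, ← hpar]
          omega
        · exact ha i h0 hiN hipos
    · rw [dif_neg hp]
      refine ⟨?_, List.Perm.refl _⟩
      intro i h0 hiN
      exact hinv.1 i h0 hiN (by omega)

theorem pvChild_facts (h : List Int) (endpos pos : Nat) (hc : 2 * pos + 1 < endpos) :
    2 * pos + 1 ≤ pvChild h endpos pos ∧ pvChild h endpos pos < endpos ∧
    pvPar (pvChild h endpos pos) = pos := by
  unfold pvChild pvPar
  split <;> exact ⟨by omega, by omega, by omega⟩

theorem pvChild_min (h : List Int) (endpos pos : Nat) (hc : 2 * pos + 1 < endpos)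
    (s : Nat) (hs0 : 0 < s) (hs : s < endpos) (hps : pvPar s = pos)
    (hsc : s ≠ pvChild h endpos pos) :
    h.getD (pvChild h endpos pos) 0 ≤ h.getD s 0 := by
  have hsrange : s = 2 * pos + 1 ∨ s = 2 * pos + 2 := by unfold pvPar at hps; omega
  unfold pvChild at hsc ⊢
  by_cases hcond : 2 * pos + 2 < endpos ∧ ¬ h.getD (2 * pos + 1) 0 < h.getD (2 * pos + 2) 0
  · rw [if_pos hcond] at hsc ⊢
    have hs1 : s = 2 * pos + 1 := by omega
    subst hs1
    exact not_lt.mp hcond.2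
  · rw [if_neg hcond] at hsc ⊢
    have hs2 : s = 2 * pos + 2 := by omega
    subst hs2
    rcases Decidable.not_and_iff_not_or_not.mp hcond with hx | hx
    · omega
    · exact le_of_lt (not_not.mp hx)

theorem su_spec_aux : ∀ (k : Nat) (h : List Int) (pos : Nat) (v : Int),
    h.length - pos ≤ k → pos < h.length → SuInv h pos →
    IsHeap (pvSiftup h h.length 0 pos v) ∧ (pvSiftup h h.length 0 pos v).Perm (h.set pos v) := by
  intro k
  induction k with
  | zero => intro h pos v hk hlt _; omega
  | succ k ih =>
    intro h pos v hk hlt hinv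
    rw [pvSiftup]
    by_cases hc : 2 * pos + 1 < h.length
    · rw [dif_pos hc]
      set c := pvChild h h.length pos with hcdef
      obtain ⟨hc1, hc2, hc3⟩ := pvChild_facts h h.length pos hc
      set h' := h.set pos (h.getD c 0) with hh'
      have hlen' : h'.length = h.length := by simp [hh']
      obtain ⟨ha, hb⟩ := hinv
      have hat : ∀ k2, k2 ≠ pos → h'.getD k2 0 = h.getD k2 0 := by
        intro k2 hk2
        rw [hh', getD_set_ne _ _ _ _ (Ne.symm hk2)]
      have hatpos : h'.getD pos 0 = h.getD c 0 := by
        rw [hh']; exact getD_set_self _ _ _ hlt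
      have hinv' : SuInv h' c := by
        constructor
        · intro i h0 hiN hic hpic
          rw [hlen'] at hiN
          by_cases hipos : i = pos
          · subst hipos
            have hpp : pvPar i < i := pvPar_lt i h0
            rw [hat _ (by omega), hatpos]
            exact hb h0 c (by omega) hc3
          · rw [hat i hipos]
            by_cases hpi : pvPar i = pos
            · rw [hpi, hatpos]
              exact pvChild_min h h.length pos hc i h0 hiN hpi hic
            · rw [hat _ hpi]
              exact ha i h0 hiN hipos hpi
        · intro hcpos j hj hpj
          rw [hlen'] at hj
          have hjc : c < j := by unfold pvPar at hpj; omega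
          rw [hc3, hatpos, hat j (by omega)]
          have hx := ha j (by omega) hj (by omega) (by omega)
          rw [hpj] at hx
          exact hx
      have hstep := ih h' c v (by omega) (by omega) hinv'
      rw [hlen'] at hstep
      obtain ⟨hs1, hs2⟩ := hstep
      refine ⟨hs1, hs2.trans ?_⟩
      have e1 : h' = (h.set pos v).set pos (h.getD c 0) := by
        rw [hh', List.set_set]
      have e2 : (h.set pos v).getD c 0 = h.getD c 0 :=
        getD_set_ne _ _ _ _ (by omega : pos ≠ c)
      have hps := perm_swap (h.set pos v) pos c (by omega) (by simpa using hlt)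
        (by simpa using hc2)
      rw [e2, getD_set_self h pos v hlt, ← e1] at hps
      exact hps
    · rw [dif_neg hc]
      have hss : (h.set pos v).set pos v = h.set pos v := by rw [List.set_set]
      have hinv2 : SdInv ((h.set pos v).set pos v) pos := by
        rw [hss]
        constructor
        · intro i h0 hiN hip
          have hiN' : i < h.length := by simpa using hiN
          have hpi : pvPar i ≠ pos := by
            intro hcon
            unfold pvPar at hcon
            omega
          rw [getD_set_ne _ _ _ _ (Ne.symm hip), getD_set_ne _ _ _ _ (Ne.symm hpi)]
          exact hinv.1 i h0 hiN' hip hpi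
        · intro hppos j hj hpj
          unfold pvPar at hpj
          have : j < h.length := by simpa using hj
          omega
      obtain ⟨hs1, hs2⟩ := sd_spec pos (h.set pos v) v (by simpa using hlt) hinv2
      rw [hss] at hs2
      exact ⟨hs1, hs2⟩

theorem su_spec (h : List Int) (pos : Nat) (v : Int) (hlt : pos < h.length)
    (hinv : SuInv h pos) :
    IsHeap (pvSiftup h h.length 0 pos v) ∧ (pvSiftup h h.length 0 pos v).Perm (h.set pos v) :=
  su_spec_aux h.length h pos v (by omega) hlt hinv

theorem set_append_last (l : List Int) (v : Int) : (l ++ [v]).set l.length v = l ++ [v] := by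
  induction l with
  | nil => rfl
  | cons x xs ih => simp [ih]

theorem heappush_spec (h : List Int) (v : Int) (hh : IsHeap h) :
    IsHeap (pvHeappush h v) ∧ (pvHeappush h v).Perm (v :: h) := by
  have hlt : h.length < (h ++ [v]).length := by simp
  have hinv : SdInv ((h ++ [v]).set h.length v) h.length := by
    rw [set_append_last]
    constructor
    · intro i h0 hiN hip
      have hi : i < h.length := by simp at hiN; omega
      have hpar : pvPar i < h.length := lt_trans (pvPar_lt i h0) hi
      rw [List.getD_eq_getElem _ _ (by simp; omega : pvPar i < (h ++ [v]).length),
        List.getD_eq_getElem _ _ (by simp; omega : i < (h ++ [v]).length)]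
      rw [List.getElem_append_left hpar, List.getElem_append_left hi]
      rw [← List.getD_eq_getElem h 0 hpar, ← List.getD_eq_getElem h 0 hi]
      exact hh i h0 hi
    · intro hppos j hj hpj
      unfold pvPar at hpj
      simp at hj
      omega
  obtain ⟨h1, h2⟩ := sd_spec h.length (h ++ [v]) v hlt hinv
  rw [set_append_last] at h2
  refine ⟨h1, h2.trans ?_⟩
  simp

theorem getD_dropLast (l : List Int) (i : Nat) (hi : i < l.dropLast.length) :
    l.dropLast.getD i 0 = l.getD i 0 := by
  have hi' : i < l.length := by simp at hi; omega
  rw [List.getD_eq_getElem _ _ hi, List.getD_eq_getElem _ _ hi']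
  exact List.getElem_dropLast ..

theorem heappop_spec (h : List Int) (hh : IsHeap h) (hne : h ≠ []) :
    ∃ h', pvHeappop h = some (h.getD 0 0, h') ∧ IsHeap h' ∧ (h.getD 0 0 :: h').Perm h := by
  have hglast : h.getLast? = some (h.getLast hne) := List.getLast?_eq_some_getLast hne
  have hsplit : h.dropLast ++ [h.getLast hne] = h := List.dropLast_append_getLast hne
  set last := h.getLast hne with hlastdef
  rcases hrest : h.dropLast with _ | ⟨r0, rtail⟩
  · -- heap had exactly one element
    have hval : h.getD 0 0 = last := by
      rw [← hsplit, hrest]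
      simp
    refine ⟨[], ?_, ?_, ?_⟩
    · simp only [pvHeappop, hglast, hrest, List.isEmpty_nil, if_true]
      rw [hval]
    · intro i h0 hi; simp at hi
    · rw [hval, ← hsplit, hrest, List.nil_append]
  · have hrlen : h.dropLast.length = h.length - 1 := by simp
    have hlenpos : 0 < h.length := List.length_pos_iff.mpr hne
    have hrlenpos : 0 < h.dropLast.length := by rw [hrest]; simp
    have hr0 : h.getD 0 0 = r0 := by
      rw [← getD_dropLast h 0 hrlenpos, hrest]
      rfl
    have hhead : h.dropLast.headD 0 = h.getD 0 0 := by
      rw [hrest, hr0]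
      rfl
    have hsetlen : (h.dropLast.set 0 last).length = h.dropLast.length := by simp
    have hinv : SuInv (h.dropLast.set 0 last) 0 := by
      constructor
      · intro i h0 hiN hic hpic
        rw [hsetlen] at hiN
        rw [getD_set_ne _ _ _ _ (by omega), getD_set_ne _ _ _ _ (by omega)]
        rw [getD_dropLast h i hiN, getD_dropLast h (pvPar i) (lt_trans (pvPar_lt i h0) hiN)]
        exact hh i h0 (by omega)
      · intro hcon; omega
    obtain ⟨hs1, hs2⟩ := su_spec (h.dropLast.set 0 last) 0 last (by rw [hsetlen]; omega) hinv
    rw [hsetlen] at hs1 hs2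
    rw [List.set_set] at hs2
    refine ⟨_, ?_, hs1, ?_⟩
    · simp only [pvHeappop, hglast]
      rw [if_neg (by rw [hrest]; simp)]
      rw [hhead]
    · -- (h[0] :: siftup result) ~ h
      refine ((hs2.cons (h.getD 0 0)).trans ?_)
      rw [hr0, hrest]
      have hstep2 : (last :: rtail).Perm (rtail ++ [last]) := by
        simpa using (List.perm_middle (a := last) (l₁ := rtail) (l₂ := [])).symm
      refine (List.Perm.cons r0 hstep2).trans ?_
      rw [show r0 :: (rtail ++ [last]) = (r0 :: rtail) ++ [last] from rfl, ← hrest, hsplit]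

theorem isHeap_getD_le (h : List Int) (hh : IsHeap h) :
    ∀ i, i < h.length → h.getD 0 0 ≤ h.getD i 0 := by
  intro i
  induction i using Nat.strong_induction_on with
  | _ i ih =>
    intro hi
    by_cases h0 : i = 0
    · subst h0; exact le_refl _
    · have hp : pvPar i < i := pvPar_lt i (by omega)
      exact le_trans (ih (pvPar i) hp (lt_trans hp hi)) (hh i (by omega) hi)

theorem isHeap_min (h : List Int) (hh : IsHeap h) : ∀ x ∈ h, h.getD 0 0 ≤ x := by
  intro x hx
  obtain ⟨i, hi, rfl⟩ := List.getElem_of_mem hx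
  rw [← List.getD_eq_getElem h 0 hi]
  exact isHeap_getD_le h hh i hi

theorem insertSorted_perm (sl : List Int) (v : Int) :
    (pvInsertSorted sl v).Perm (v :: sl) := by
  induction sl with
  | nil => exact List.Perm.refl _
  | cons x xs ih =>
    simp only [pvInsertSorted]
    split
    · exact List.Perm.refl _
    · exact (ih.cons x).trans (List.Perm.swap v x xs)

theorem insertSorted_sorted (sl : List Int) (v : Int) (hs : sl.Pairwise (· ≤ ·)) :
    (pvInsertSorted sl v).Pairwise (· ≤ ·) := by
  induction sl with
  | nil => simp [pvInsertSorted]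
  | cons x xs ih =>
    rcases List.pairwise_cons.mp hs with ⟨hx, hxs⟩
    simp only [pvInsertSorted]
    split
    · rename_i hv
      refine List.pairwise_cons.mpr ⟨?_, hs⟩
      intro y hy
      rcases List.mem_cons.mp hy with rfl | hy
      · exact le_of_lt hv
      · exact le_trans (le_of_lt hv) (hx y hy)
    · rename_i hv
      refine List.pairwise_cons.mpr ⟨?_, ih hxs⟩
      intro y hy
      have := (insertSorted_perm xs v).mem_iff.mp hy
      rcases List.mem_cons.mp this with rfl | hy'
      · omega
      · exact hx y hy'

theorem pvLoop_nil (K count : Int) (fuel : Nat) : pvLoop K [] count fuel = 0 := by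
  cases fuel <;> simp [pvLoop]

theorem pvGo_nil (K count : Int) : pvGo K [] count = 0 := by
  simp [pvGo]

theorem pvGo_one (K a count : Int) (h : a < K) : pvGo K [a] count = -1 := by
  simp [pvGo, h]

theorem pvGo_cons2 (K a b count : Int) (rest2 : List Int) (h : a < K) :
    pvGo K (a :: b :: rest2) count = pvGo K (pvInsertSorted rest2 (a + b * 2)) (count + 1) := by
  simp [pvGo, h]

theorem pvGo_ge (K a count : Int) (rest : List Int) (h : ¬ a < K) :
    pvGo K (a :: rest) count = count := by
  cases rest <;> simp [pvGo, h]

theorem pvMain (n : Nat) (K : Int) : ∀ (heap sl : List Int) (count : Int),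
    heap.length < n → IsHeap heap → sl.Pairwise (· ≤ ·) → heap.Perm sl →
    pvLoop K heap count n = pvGo K sl count := by
  induction n with
  | zero =>
    intro heap sl count hn _ _ _
    omega
  | succ n ih =>
    intro heap sl count hn hh hs hp
    cases sl with
    | nil =>
      have h1 : heap = [] := hp.eq_nil
      rw [h1, pvLoop_nil, pvGo_nil]
    | cons a rest =>
      cases heap with
      | nil => exact absurd hp.symm.eq_nil (by simp)
      | cons y ys =>
        have hne : (y :: ys) ≠ ([] : List Int) := by simp
        -- the heap root equals the sorted list's head: both are the minimum
        have hymem : a ∈ (y :: ys) := hp.mem_iff.mpr (List.mem_cons_self)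
        have hya : y ≤ a := by
          have := isHeap_min (y :: ys) hh a hymem
          simpa using this
        have hay : a ≤ y := by
          have hyin : y ∈ a :: rest := hp.mem_iff.mp (List.mem_cons_self)
          rcases List.mem_cons.mp hyin with rfl | hyr
          · exact le_refl _
          · exact (List.pairwise_cons.mp hs).1 y hyr
        have hae : y = a := le_antisymm hya hay
        subst hae
        simp only [pvLoop]
        by_cases hK : y < K
        · rw [if_pos hK]
          obtain ⟨h1', e1, hh1, hp1⟩ := heappop_spec (y :: ys) hh hne
          have hget0 : ((y :: ys) : List Int).getD 0 0 = y := rfl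
          rw [hget0] at e1 hp1
          have hp1' : h1'.Perm rest := (hp1.trans hp).cons_inv
          split
          · rename_i heq
            rw [e1] at heq
            cases heq
          · rename_i a1 heap1 heq
            rw [e1] at heq
            obtain ⟨h5, h6⟩ := Prod.mk.inj (Option.some.inj heq)
            subst h5
            subst h6
            cases rest with
            | nil =>
              have hh1e : h1' = [] := hp1'.eq_nil
              subst hh1e
              split
              · rw [pvGo_one K y count hK]
              · rename_i b1 heap2 heq2
                simp [pvHeappop] at heq2
            | cons b rest2 =>
              have hne1 : h1' ≠ [] := by
                intro hcon
                rw [hcon] at hp1'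
                exact absurd hp1'.symm.eq_nil (by simp)
              obtain ⟨h2', e2, hh2, hp2⟩ := heappop_spec h1' hh1 hne1
              have hrs : (b :: rest2).Pairwise (· ≤ · : Int → Int → Prop) :=
                (List.pairwise_cons.mp hs).2
              -- h1'’s root is b, the second smallest
              have hbmem : b ∈ h1' := hp1'.mem_iff.mpr (List.mem_cons_self)
              have hb1 : h1'.getD 0 0 ≤ b := isHeap_min h1' hh1 b hbmem
              have hb2 : b ≤ h1'.getD 0 0 := by
                have hroot : h1'.getD 0 0 ∈ h1' := by
                  cases h1' with
                  | nil => exact absurd rfl hne1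
                  | cons z zs => exact List.mem_cons_self
                have hmem2 : h1'.getD 0 0 ∈ b :: rest2 := hp1'.mem_iff.mp hroot
                rcases List.mem_cons.mp hmem2 with he | hr
                · omega
                · exact (List.pairwise_cons.mp hrs).1 _ hr
              have hbe : h1'.getD 0 0 = b := le_antisymm hb1 hb2
              rw [hbe] at e2 hp2
              split
              · rename_i heq2
                rw [e2] at heq2
                cases heq2
              · rename_i b1 heap2 heq2
                rw [e2] at heq2
                obtain ⟨h7, h8⟩ := Prod.mk.inj (Option.some.inj heq2)
                subst h7
                subst h8
                have hp2' : h2'.Perm rest2 := (hp2.trans hp1').cons_inv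
                obtain ⟨hph, hpp⟩ := heappush_spec h2' (y + b * 2) hh2
                rw [pvGo_cons2 K y b count rest2 hK]
                apply ih
                · have l1 := hp.length_eq
                  have l2 := hp2'.length_eq
                  rw [length_pvHeappush]
                  simp only [List.length_cons] at l1 hn
                  omega
                · exact hph
                · exact insertSorted_sorted rest2 (y + b * 2) (List.pairwise_cons.mp hrs).2
                · exact hpp.trans ((hp2'.cons _).trans (insertSorted_perm rest2 (y + b * 2)).symm)
        · rw [if_neg hK, pvGo_ge K y count rest hK]

theorem heapify_spec (xs : List Int) : ∀ (acc : List Int), IsHeap acc →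
    IsHeap (xs.foldl pvHeappush acc) ∧ (xs.foldl pvHeappush acc).Perm (acc ++ xs) := by
  induction xs with
  | nil => intro acc hacc; exact ⟨hacc, by simp⟩
  | cons x xs ih =>
    intro acc hacc
    obtain ⟨h1, h2⟩ := heappush_spec acc x hacc
    obtain ⟨h3, h4⟩ := ih (pvHeappush acc x) h1
    exact ⟨h3, h4.trans ((h2.append_right xs).trans List.perm_middle.symm)⟩

-- ===== VERDICT (by name: the statement is the Claim_ definition above) =====
theorem solution_spec : Claim_equal_solution := by
  intro scoville K _ _
  unfold Spec_solution solution solution_alt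
  obtain ⟨hh, hp⟩ := heapify_spec scoville [] (by intro i h1 h2; simp at h2)
  exact pvMain ((scoville.foldl pvHeappush []).length + 1) K _ _ 0 (by omega) hh
    (by simpa using PySem.List.sorted_pairwise scoville (fun x => x))
    (by simp at hp; exact hp.trans (PySem.List.sorted_perm scoville (fun x => x) false).symm)
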